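-- pv_equiv track=rewrite | github.com/codepartialrd/RelaxRD | CoreAFD/source/quickcore.py | _is_redundancy
-- ===== SOURCE A (Python) =====
-- from collections import defaultdict
--
-- def _is_redundancy(F):
--     rhs_seen = set()
--     for _, A in F:
--         if A in rhs_seen:
--             return True
--         rhs_seen.add(A)
--     g = defaultdict(set)
--     for lhs, A in F:
--         for a in lhs:
--             g[a].add(A)
--     seen = set()
--     def dfs(v, stk):
--         seen.add(v)
--         stk.add(v)
--         for nxt in g.get(v, ()):
--             if nxt in stk or (nxt not in seen and dfs(nxt, stk)):
--                 return True
--         stk.remove(v)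
--         return False
--     return any(dfs(n, set()) for n in list(g) if n not in seen)
-- ===== SOURCE B (Python) =====
-- def _is_redundancy(F):
--     rhs = [A for _, A in F]
--     if len(set(rhs)) != len(rhs):
--         return True
--     edges = [(a, A) for lhs, A in F for a in lhs]
--     live = set(a for a, _ in edges) | set(b for _, b in edges)
--     for _ in range(len(edges) + 1):
--         new = set(b for a, b in edges if a in live)
--         if new == live:
--             break
--         live = new
--     return bool(live)
-- ===== Notes on version B (the rewrite author's own statement) =====
-- stated objective: alternative
-- what changed: The duplicate-RHS early-return loop becomes a len(set(..)) comparison, and the recursive shared-'seen' DFS cycle detection is replaced by an iterated fixpoint over a flat edge list: live starts as all nodes and is repeatedly replaced by the targets of live sources; a cycle exists iff live is nonempty after len(edges)+1 rounds.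
import Mathlib
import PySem

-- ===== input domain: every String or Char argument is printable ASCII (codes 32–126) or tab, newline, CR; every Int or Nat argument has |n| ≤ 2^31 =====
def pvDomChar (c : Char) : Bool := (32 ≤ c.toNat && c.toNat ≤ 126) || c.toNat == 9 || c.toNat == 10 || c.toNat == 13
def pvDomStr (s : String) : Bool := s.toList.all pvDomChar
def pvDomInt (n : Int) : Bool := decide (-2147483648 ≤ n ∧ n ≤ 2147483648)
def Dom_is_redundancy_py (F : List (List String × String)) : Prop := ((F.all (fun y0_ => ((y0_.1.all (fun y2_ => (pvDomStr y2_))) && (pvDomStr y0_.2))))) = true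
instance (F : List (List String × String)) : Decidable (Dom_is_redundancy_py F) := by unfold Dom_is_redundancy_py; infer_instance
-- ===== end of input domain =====

-- B replaces the shared-seen recursive DFS cycle test with an iterated
-- source-peeling fixpoint over a flat edge list (alternative algorithm, not faster).

-- ===== PORT A =====
-- rhs_seen loop with early return
def dupLoopA : List (List String × String) → PySem.Set String → Bool
  | [], _ => false
  | p :: rest, seen =>
    if PySem.Set.contains seen p.2 then true
    else dupLoopA rest (PySem.Set.add seen p.2)

-- g = defaultdict(set); for lhs, A in F: for a in lhs: g[a].add(A)
def buildG (F : List (List String × String)) : PySem.Dict String (PySem.Set String) :=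
  F.foldl (fun g p =>
    p.1.foldl (fun g a => g.insert a (PySem.Set.add (PySem.Dict.getD g a PySem.Set.empty) p.2)) g)
    PySem.Dict.empty

-- dfs(v, stk) with the shared `seen`; result = (returned bool, seen, stk).
-- The fuel argument only makes the recursion structural; it is proved never to
-- run out for the fuel `nodeBound F` used below.  The successor set g[v] is
-- consumed in insertion order (the boolean result is order-independent).
mutual
def dfsA (g : PySem.Dict String (PySem.Set String)) :
    Nat → String → PySem.Set String → PySem.Set String → Bool × PySem.Set String × PySem.Set String
  | 0, _, stk, seen => (false, seen, stk)
  | fuel+1, v, stk, seen =>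
      dfsLoopA g fuel v (PySem.Dict.getD g v PySem.Set.empty) (PySem.Set.add stk v) (PySem.Set.add seen v)
  termination_by fuel _ _ _ => (fuel, 0)
def dfsLoopA (g : PySem.Dict String (PySem.Set String)) :
    Nat → String → List String → PySem.Set String → PySem.Set String → Bool × PySem.Set String × PySem.Set String
  | _, v, [], stk, seen => (false, seen, PySem.Set.discard stk v)
  | fuel, v, nxt :: rest, stk, seen =>
      if PySem.Set.contains stk nxt then (true, seen, stk)
      else if PySem.Set.contains seen nxt then dfsLoopA g fuel v rest stk seen
      else
        let r := dfsA g fuel nxt stk seen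
        if r.1 then r else dfsLoopA g fuel v rest r.2.2 r.2.1
  termination_by fuel _ l _ _ => (fuel, l.length + 1)
end

-- any(dfs(n, set()) for n in list(g) if n not in seen)
def outerA (g : PySem.Dict String (PySem.Set String)) (fuel : Nat) :
    List String → PySem.Set String → Bool
  | [], _ => false
  | n :: rest, seen =>
    if PySem.Set.contains seen n then outerA g fuel rest seen
    else
      let r := dfsA g fuel n PySem.Set.empty seen
      if r.1 then true else outerA g fuel rest r.2.1

-- strict upper bound for the number of distinct graph nodes (fuel for dfsA)
def nodeBound (F : List (List String × String)) : Nat :=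
  F.foldl (fun n p => n + 2 * p.1.length + 1) 1

def is_redundancy_py (F : List (List String × String)) : Bool :=
  if dupLoopA F PySem.Set.empty then true
  else
    let g := buildG F
    outerA g (nodeBound F) g.keys PySem.Set.empty

-- ===== PORT B =====
-- edges = [(a, A) for lhs, A in F for a in lhs]
def edgesB (F : List (List String × String)) : List (String × String) :=
  F.flatMap (fun p => p.1.map (fun a => (a, p.2)))

-- live = set(b for a, b in edges if a in live)
def stepLive (edges : List (String × String)) (live : PySem.Set String) : PySem.Set String :=
  PySem.Set.ofList ((edges.filter (fun e => PySem.Set.contains live e.1)).map Prod.snd)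

-- for _ in range(k): new = step(live); if new == live: break; live = new
def iterLive (edges : List (String × String)) : Nat → PySem.Set String → PySem.Set String
  | 0, live => live
  | k+1, live =>
      let new := stepLive edges live
      if PySem.Set.equal new live then live
      else iterLive edges k new

def is_redundancy_py_alt (F : List (List String × String)) : Bool :=
  let rhs := F.map Prod.snd
  if (PySem.Set.ofList rhs).length ≠ rhs.length then true
  else
    let edges := edgesB F
    let live0 := PySem.Set.union (PySem.Set.ofList (edges.map Prod.fst)) (edges.map Prod.snd)
    !(iterLive edges (edges.length + 1) live0).isEmpty

-- ===== PRECONDITION & SPEC =====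
def Spec_is_redundancy_py (F : List (List String × String)) (out : Bool) : Prop := out = is_redundancy_py_alt F
instance (F : List (List String × String)) (out : Bool) : Decidable (Spec_is_redundancy_py F out) := by unfold Spec_is_redundancy_py; infer_instance

-- ===== CLAIM (what is proved, stated in full; the proofs are below) =====
def Claim_equal_is_redundancy_py : Prop := ∀ (F : List (List String × String)), Dom_is_redundancy_py F → Spec_is_redundancy_py F (is_redundancy_py F)

-- ===== LEMMAS AND PROOFS =====

-- the edge relation of the FD graph, reachability, and cycle existence
def Edge (edges : List (String × String)) (v w : String) : Prop := (v, w) ∈ edges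
def Reach (edges : List (String × String)) (v w : String) : Prop :=
  Relation.ReflTransGen (Edge edges) v w
def HasCyc (edges : List (String × String)) : Prop :=
  ∃ v w, Edge edges v w ∧ Reach edges w v

def aNodes (edges : List (String × String)) : List String :=
  edges.map Prod.fst ++ edges.map Prod.snd

-- number of universe nodes not yet seen (fuel measure for dfsA)
def rem (edges : List (String × String)) (seen : PySem.Set String) : Nat :=
  (PySem.Set.ofList (aNodes edges)).countP (fun x => !(PySem.Set.contains seen x))

-- the DFS invariant: seen \ stk is edge-closed, avoids stk and carries no cycle
def InvA (edges : List (String × String)) (seen stk : PySem.Set String) : Prop :=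
  (∀ u ∈ stk, u ∈ seen) ∧
  (∀ u ∈ seen, u ∉ stk → ∀ w, Edge edges u w → w ∈ seen ∧ w ∉ stk) ∧
  (∀ u ∈ seen, u ∉ stk → ∀ w, Edge edges u w → ¬ Reach edges w u)

-- ---- generic counting lemmas ----
lemma not_contains {α : Type} [BEq α] [LawfulBEq α] (s : PySem.Set α) (x : α) :
    PySem.Set.contains s x = false ↔ x ∉ s := by
  cases hc : PySem.Set.contains s x
  · simp only [true_iff]
    intro hm
    rw [(PySem.Set.contains_iff s x).mpr hm] at hc
    cases hc
  · constructor
    · intro h; cases h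
    · intro hm; exact absurd ((PySem.Set.contains_iff s x).mp hc) hm

lemma countP_lt_of_witness {α : Type} (l : List α) (p q : α → Bool)
    (hpq : ∀ x ∈ l, q x = true → p x = true) (v : α) (hv : v ∈ l)
    (hp : p v = true) (hq : q v = false) : l.countP q < l.countP p := by
  induction l with
  | nil => cases hv
  | cons a t ih =>
    simp only [List.countP_cons]
    rcases List.mem_cons.mp hv with rfl | hvt
    · have hle : t.countP q ≤ t.countP p :=
        List.countP_mono_left (fun x hx h => hpq x (List.mem_cons_of_mem _ hx) h)
      rw [hp, hq, if_pos rfl, if_neg (by simp)]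
      omega
    · have hlt := ih (fun x hx h => hpq x (List.mem_cons_of_mem _ hx) h) hvt
      by_cases hqa : q a = true
      · have hpa := hpq a List.mem_cons_self hqa
        simp [hqa, hpa]; omega
      · simp only [Bool.not_eq_true] at hqa
        rw [hqa, if_neg (by simp)]
        by_cases hpa : p a = true
        · rw [hpa, if_pos rfl]; omega
        · simp only [Bool.not_eq_true] at hpa
          rw [hpa, if_neg (by simp)]; omega

lemma foldl_add_length_le {α : Type} [BEq α] :
    ∀ (l : List α) (s : PySem.Set α), (List.foldl PySem.Set.add s l).length ≤ s.length + l.length := by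
  intro l
  induction l with
  | nil => intro s; simp
  | cons x t ih =>
    intro s
    have hadd : (PySem.Set.add s x).length ≤ s.length + 1 := by
      unfold PySem.Set.add; split <;> simp
    calc (List.foldl PySem.Set.add s (x :: t)).length
        = (List.foldl PySem.Set.add (PySem.Set.add s x) t).length := by simp
      _ ≤ (PySem.Set.add s x).length + t.length := ih _
      _ ≤ s.length + (x :: t).length := by simp; omega

lemma ofList_length_le {α : Type} [BEq α] (l : List α) :
    (PySem.Set.ofList l).length ≤ l.length := by
  simpa [PySem.Set.ofList, PySem.Set.empty] using foldl_add_length_le l []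

lemma toFinset_card_lt_of_not_nodup {α : Type} [DecidableEq α] :
    ∀ (l : List α), ¬ l.Nodup → l.toFinset.card < l.length := by
  intro l
  induction l with
  | nil => intro h; exact absurd List.nodup_nil h
  | cons a t ih =>
    intro h
    rw [List.nodup_cons] at h
    by_cases ha : a ∈ t
    · rw [List.toFinset_cons, Finset.card_insert_of_mem (List.mem_toFinset.mpr ha)]
      have := List.toFinset_card_le t
      simp only [List.length_cons]; omega
    · have hnd : ¬ t.Nodup := fun hh => h ⟨ha, hh⟩
      have hlt := ih hnd
      rw [List.toFinset_cons]
      have := Finset.card_insert_le a t.toFinset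
      simp only [List.length_cons]; omega

-- ---- duplicate-RHS check ----
lemma dupLoopA_false_iff :
    ∀ (F : List (List String × String)) (seen : PySem.Set String),
      dupLoopA F seen = false ↔
        ((F.map Prod.snd).Nodup ∧ ∀ x ∈ F.map Prod.snd, x ∉ seen) := by
  intro F
  induction F with
  | nil => intro seen; simp [dupLoopA]
  | cons p rest ih =>
    intro seen
    by_cases hc : PySem.Set.contains seen p.2 = true
    · simp only [dupLoopA, hc, if_true]
      constructor
      · intro h; cases h
      · rintro ⟨_, hns⟩
        exact absurd ((PySem.Set.contains_iff _ _).mp hc)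
          (hns p.2 (by simp))
    · simp only [Bool.not_eq_true] at hc
      have hp2 : p.2 ∉ seen := (not_contains _ _).mp hc
      simp only [dupLoopA, hc, Bool.false_eq_true, if_false]
      rw [ih]
      simp only [List.map_cons, List.nodup_cons]
      constructor
      · rintro ⟨hnd, hmem⟩
        refine ⟨⟨?_, hnd⟩, ?_⟩
        · intro hmem2
          exact hmem p.2 hmem2 ((PySem.Set.mem_add _ _ _).mpr (Or.inr rfl))
        · intro x hx
          rcases List.mem_cons.mp hx with rfl | hx'
          · exact hp2
          · intro hxs
            exact hmem x hx' ((PySem.Set.mem_add _ _ _).mpr (Or.inl hxs))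
      · rintro ⟨⟨hnotin, hnd⟩, hall⟩
        refine ⟨hnd, ?_⟩
        intro x hx hmem'
        rcases (PySem.Set.mem_add _ _ _).mp hmem' with h | rfl
        · exact hall x (List.mem_cons_of_mem _ hx) h
        · exact hnotin hx

lemma ofList_length_eq_iff {α : Type} [BEq α] [LawfulBEq α] [DecidableEq α] (l : List α) :
    (PySem.Set.ofList l).length = l.length ↔ l.Nodup := by
  have h1 : (PySem.Set.ofList l).toFinset = l.toFinset := by
    ext x; simp [List.mem_toFinset, PySem.Set.mem_ofList]
  have h2 : (PySem.Set.ofList l).toFinset.card = (PySem.Set.ofList l).length :=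
    List.toFinset_card_of_nodup (PySem.Set.nodup_ofList l)
  constructor
  · intro h
    by_contra hnd
    have hlt := toFinset_card_lt_of_not_nodup l hnd
    rw [← h1, h2, h] at hlt
    omega
  · intro hnd
    rw [← h2, h1, List.toFinset_card_of_nodup hnd]

-- ---- bridge: the dict g and the edge list describe the same graph ----
lemma inner_getD :
    ∀ (lhs : List String) (A : String) (g : PySem.Dict String (PySem.Set String)) (v w : String),
      w ∈ PySem.Dict.getD
            (lhs.foldl (fun g a =>
              g.insert a (PySem.Set.add (PySem.Dict.getD g a PySem.Set.empty) A)) g)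
            v PySem.Set.empty ↔
        (w ∈ PySem.Dict.getD g v PySem.Set.empty ∨ (v ∈ lhs ∧ w = A)) := by
  intro lhs
  induction lhs with
  | nil => intro A g v w; simp
  | cons a t ih =>
    intro A g v w
    rw [List.foldl_cons, ih]
    rcases eq_or_ne v a with rfl | hva
    · rw [PySem.Dict.getD_insert]
      simp only [if_true, PySem.Set.mem_add, List.mem_cons, true_or, true_and]
      tauto
    · rw [PySem.Dict.getD_insert]
      simp only [if_neg hva, List.mem_cons]
      tauto

lemma outer_getD :
    ∀ (F : List (List String × String)) (g : PySem.Dict String (PySem.Set String)) (v w : String),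
      w ∈ PySem.Dict.getD
            (F.foldl (fun g p =>
              p.1.foldl (fun g a =>
                g.insert a (PySem.Set.add (PySem.Dict.getD g a PySem.Set.empty) p.2)) g) g)
            v PySem.Set.empty ↔
        (w ∈ PySem.Dict.getD g v PySem.Set.empty ∨ Edge (edgesB F) v w) := by
  intro F
  induction F with
  | nil => intro g v w; simp [edgesB, Edge]
  | cons p rest ih =>
    intro g v w
    rw [List.foldl_cons, ih, inner_getD]
    simp only [Edge, edgesB, List.flatMap_cons, List.mem_append, List.mem_map, Prod.mk.injEq]
    constructor
    · rintro ((h | ⟨hv, rfl⟩) | h)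
      · exact Or.inl h
      · exact Or.inr (Or.inl ⟨v, hv, rfl, rfl⟩)
      · exact Or.inr (Or.inr h)
    · rintro (h | (⟨a, ha, rfl, rfl⟩ | h))
      · exact Or.inl (Or.inl h)
      · exact Or.inl (Or.inr ⟨ha, rfl⟩)
      · exact Or.inr h

lemma mem_getD_buildG (F : List (List String × String)) (v w : String) :
    w ∈ PySem.Dict.getD (buildG F) v PySem.Set.empty ↔ Edge (edgesB F) v w := by
  unfold buildG
  rw [outer_getD]
  simp [PySem.Dict.getD_empty, PySem.Set.empty]

lemma outer_keys :
    ∀ (F : List (List String × String)) (g : PySem.Dict String (PySem.Set String)) (v : String),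
      v ∈ (F.foldl (fun g p =>
              p.1.foldl (fun g a =>
                g.insert a (PySem.Set.add (PySem.Dict.getD g a PySem.Set.empty) p.2)) g) g).keys ↔
        (v ∈ g.keys ∨ v ∈ (edgesB F).map Prod.fst) := by
  intro F
  induction F with
  | nil => intro g v; simp [edgesB]
  | cons p rest ih =>
    intro g v
    rw [List.foldl_cons, ih]
    have hkeys : (p.1.foldl (fun g a =>
        g.insert a (PySem.Set.add (PySem.Dict.getD g a PySem.Set.empty) p.2)) g).keys
        = PySem.Set.update g.keys (p.1.map (fun a => a)) :=
      PySem.Dict.keys_foldl_insert_key p.1 (fun a => a) _ g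
    rw [hkeys]
    have hmapfst : List.map Prod.fst (List.map (fun a => (a, p.2)) p.1) = p.1 := by
      rw [List.map_map]; simp [Function.comp_def]
    simp only [edgesB, List.flatMap_cons, List.map_append, hmapfst, List.mem_append,
      PySem.Set.mem_update, List.map_id']
    tauto

lemma mem_keys_buildG (F : List (List String × String)) (v : String) :
    v ∈ (buildG F).keys ↔ v ∈ (edgesB F).map Prod.fst := by
  unfold buildG
  rw [outer_keys]
  simp [PySem.Dict.keys_empty]

-- ---- universe / fuel lemmas ----
lemma edge_mem_aNodes {edges : List (String × String)} {v w : String}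
    (h : Edge edges v w) : v ∈ aNodes edges ∧ w ∈ aNodes edges := by
  constructor
  · exact List.mem_append.mpr (Or.inl (List.mem_map.mpr ⟨(v, w), h, rfl⟩))
  · exact List.mem_append.mpr (Or.inr (List.mem_map.mpr ⟨(v, w), h, rfl⟩))

lemma rem_le (edges : List (String × String)) {s s' : PySem.Set String}
    (h : ∀ x ∈ s, x ∈ s') : rem edges s' ≤ rem edges s := by
  refine List.countP_mono_left ?_
  intro x _ hx
  have hx' : x ∉ s' := by
    have : PySem.Set.contains s' x = false := by
      cases hc : PySem.Set.contains s' x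
      · rfl
      · rw [hc] at hx; cases hx
    exact (not_contains _ _).mp this
  have hxs : x ∉ s := fun hm => hx' (h x hm)
  have : PySem.Set.contains s x = false := (not_contains _ _).mpr hxs
  rw [this]; rfl

lemma rem_lt (edges : List (String × String)) {s s' : PySem.Set String} {v : String}
    (hv : v ∈ aNodes edges) (hvs : v ∉ s) (h : ∀ x ∈ s, x ∈ s') (hv' : v ∈ s') :
    rem edges s' < rem edges s := by
  refine countP_lt_of_witness _ _ _ ?_ v ((PySem.Set.mem_ofList _ _).mpr hv) ?_ ?_
  · intro x _ hx
    have hx' : x ∉ s' := by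
      have hcf : PySem.Set.contains s' x = false := by
        cases hc : PySem.Set.contains s' x
        · rfl
        · rw [hc] at hx; cases hx
      exact (not_contains _ _).mp hcf
    have hxs : x ∉ s := fun hm => hx' (h x hm)
    rw [(not_contains _ _).mpr hxs]; rfl
  · rw [(not_contains _ _).mpr hvs]; rfl
  · rw [(PySem.Set.contains_iff _ _).mpr hv']; rfl

lemma rem_le_two_mul (edges : List (String × String)) (s : PySem.Set String) :
    rem edges s ≤ 2 * edges.length := by
  have h1 : rem edges s ≤ (PySem.Set.ofList (aNodes edges)).length := List.countP_le_length
  have h2 := ofList_length_le (aNodes edges)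
  have h3 : (aNodes edges).length = 2 * edges.length := by
    simp [aNodes]; omega
  omega

lemma nodeBound_acc :
    ∀ (F : List (List String × String)) (c : Nat),
      c + 2 * (edgesB F).length ≤ F.foldl (fun n p => n + 2 * p.1.length + 1) c := by
  intro F
  induction F with
  | nil => intro c; simp [edgesB]
  | cons p rest ih =>
    intro c
    have h1 : (edgesB (p :: rest)).length = p.1.length + (edgesB rest).length := by
      simp [edgesB]
    rw [List.foldl_cons]
    have := ih (c + 2 * p.1.length + 1)
    omega

lemma two_mul_edges_lt_nodeBound (F : List (List String × String)) :
    2 * (edgesB F).length < nodeBound F := by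
  have := nodeBound_acc F 1
  unfold nodeBound
  omega

-- ---- DFS invariant lemmas ----
lemma region_reach {edges : List (String × String)} {seen stk : PySem.Set String}
    (hI : InvA edges seen stk) {u x : String} (hu : u ∈ seen) (hus : u ∉ stk)
    (hr : Reach edges u x) : x ∈ seen ∧ x ∉ stk := by
  induction hr with
  | refl => exact ⟨hu, hus⟩
  | tail _ h2 ih => exact hI.2.1 _ ih.1 ih.2 _ h2

lemma discard_add {α : Type} [BEq α] [LawfulBEq α] (s : PySem.Set α) (v : α)
    (hv : v ∉ s) : PySem.Set.discard (PySem.Set.add s v) v = s := by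
  have hc : PySem.Set.contains s v = false := (not_contains _ _).mpr hv
  unfold PySem.Set.add PySem.Set.discard
  rw [hc]
  simp only [Bool.false_eq_true, if_false, List.filter_append]
  have h1 : List.filter (fun y => !y == v) [v] = [] := by simp
  rw [h1, List.append_nil, List.filter_eq_self]
  intro x hx
  have hxv : x ≠ v := fun h => hv (h ▸ hx)
  simp [hxv]

lemma inv_push {edges : List (String × String)} {seen stk : PySem.Set String} {v : String}
    (hI : InvA edges seen stk) (hv : v ∉ seen) :
    InvA edges (PySem.Set.add seen v) (PySem.Set.add stk v) := by
  obtain ⟨h1, h2, h3⟩ := hI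
  refine ⟨?_, ?_, ?_⟩
  · intro u hu
    rcases (PySem.Set.mem_add _ _ _).mp hu with h | rfl
    · exact (PySem.Set.mem_add _ _ _).mpr (Or.inl (h1 u h))
    · exact (PySem.Set.mem_add _ _ _).mpr (Or.inr rfl)
  · intro u hu hustk w hw
    have huv : u ≠ v := fun h => hustk (h ▸ (PySem.Set.mem_add _ _ _).mpr (Or.inr rfl))
    have hus : u ∈ seen := by
      rcases (PySem.Set.mem_add _ _ _).mp hu with h | h
      · exact h
      · exact absurd h huv
    have hustk' : u ∉ stk := fun h => hustk ((PySem.Set.mem_add _ _ _).mpr (Or.inl h))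
    obtain ⟨hw1, hw2⟩ := h2 u hus hustk' w hw
    have hwv : w ≠ v := fun h => hv (h ▸ hw1)
    refine ⟨(PySem.Set.mem_add _ _ _).mpr (Or.inl hw1), ?_⟩
    intro hmem
    rcases (PySem.Set.mem_add _ _ _).mp hmem with h | h
    · exact hw2 h
    · exact hwv h
  · intro u hu hustk w hw
    have huv : u ≠ v := fun h => hustk (h ▸ (PySem.Set.mem_add _ _ _).mpr (Or.inr rfl))
    have hus : u ∈ seen := by
      rcases (PySem.Set.mem_add _ _ _).mp hu with h | h
      · exact h
      · exact absurd h huv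
    have hustk' : u ∉ stk := fun h => hustk ((PySem.Set.mem_add _ _ _).mpr (Or.inl h))
    exact h3 u hus hustk' w hw

lemma inv_pop {edges : List (String × String)} {S stk : PySem.Set String} {v : String}
    (hI : InvA edges S (PySem.Set.add stk v)) (hvstk : v ∉ stk) (hvS : v ∈ S)
    (hsucc : ∀ w, Edge edges v w → w ∈ S ∧ w ∉ PySem.Set.add stk v) :
    InvA edges S stk := by
  obtain ⟨h1, h2, h3⟩ := hI
  have hmemadd : ∀ u : String, u ∈ PySem.Set.add stk v ↔ u ∈ stk ∨ u = v :=
    fun u => PySem.Set.mem_add _ _ _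
  refine ⟨?_, ?_, ?_⟩
  · intro u hu
    exact h1 u ((hmemadd u).mpr (Or.inl hu))
  · intro u hu hustk w hw
    rcases eq_or_ne u v with rfl | huv
    · obtain ⟨hw1, hw2⟩ := hsucc w hw
      exact ⟨hw1, fun h => hw2 ((hmemadd w).mpr (Or.inl h))⟩
    · have hustk' : u ∉ PySem.Set.add stk v := fun h => by
        rcases (hmemadd u).mp h with h' | h'
        · exact hustk h'
        · exact huv h'
      obtain ⟨hw1, hw2⟩ := h2 u hu hustk' w hw
      exact ⟨hw1, fun h => hw2 ((hmemadd w).mpr (Or.inl h))⟩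
  · intro u hu hustk w hw hR
    rcases eq_or_ne u v with rfl | huv
    · obtain ⟨hw1, hw2⟩ := hsucc w hw
      have := region_reach ⟨h1, h2, h3⟩ hw1 hw2 hR
      exact this.2 ((hmemadd u).mpr (Or.inr rfl))
    · have hustk' : u ∉ PySem.Set.add stk v := fun h => by
        rcases (hmemadd u).mp h with h' | h'
        · exact hustk h'
        · exact huv h'
      exact h3 u hu hustk' w hw hR

-- ---- the main DFS lemma ----
lemma dfs_main (g : PySem.Dict String (PySem.Set String)) (edges : List (String × String))
    (hg : ∀ v w, w ∈ PySem.Dict.getD g v PySem.Set.empty ↔ Edge edges v w) :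
    ∀ (fuel : Nat) (v : String) (stk seen : PySem.Set String),
      rem edges seen < fuel → v ∈ aNodes edges → v ∉ seen →
      (∀ u ∈ stk, Reach edges u v) → InvA edges seen stk →
      ((dfsA g fuel v stk seen).1 = true → HasCyc edges) ∧
      ((dfsA g fuel v stk seen).1 = false →
        (dfsA g fuel v stk seen).2.2 = stk ∧
        (∀ x ∈ seen, x ∈ (dfsA g fuel v stk seen).2.1) ∧
        v ∈ (dfsA g fuel v stk seen).2.1 ∧
        InvA edges (dfsA g fuel v stk seen).2.1 stk) := by
  intro fuel
  induction fuel with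
  | zero =>
    intro v stk seen hrem _ _ _ _
    exact absurd hrem (Nat.not_lt_zero _)
  | succ fuel ih =>
    intro v stk seen hrem hvN hvseen hstk hI
    have hvstk : v ∉ stk := fun h => hvseen (hI.1 v h)
    have hI1 : InvA edges (PySem.Set.add seen v) (PySem.Set.add stk v) := inv_push hI hvseen
    have hseen_sub : ∀ x ∈ seen, x ∈ PySem.Set.add seen v :=
      fun x hx => (PySem.Set.mem_add _ _ _).mpr (Or.inl hx)
    have hvs1 : v ∈ PySem.Set.add seen v := (PySem.Set.mem_add _ _ _).mpr (Or.inr rfl)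
    have hrem1 : rem edges (PySem.Set.add seen v) < fuel := by
      have h1 := rem_lt edges hvN hvseen hseen_sub hvs1
      omega
    have hstk1 : ∀ u ∈ PySem.Set.add stk v, Reach edges u v := by
      intro u hu
      rcases (PySem.Set.mem_add _ _ _).mp hu with h | h
      · exact hstk u h
      · rw [h]
        exact Relation.ReflTransGen.refl
    have hloop : ∀ (rest : List String), (∀ nxt ∈ rest, Edge edges v nxt) →
        ∀ (sc : PySem.Set String),
        (∀ w, Edge edges v w → w ∈ rest ∨ (w ∈ sc ∧ w ∉ PySem.Set.add stk v)) →
        InvA edges sc (PySem.Set.add stk v) → rem edges sc < fuel →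
        v ∈ sc →
        ((dfsLoopA g fuel v rest (PySem.Set.add stk v) sc).1 = true → HasCyc edges) ∧
        ((dfsLoopA g fuel v rest (PySem.Set.add stk v) sc).1 = false →
          (dfsLoopA g fuel v rest (PySem.Set.add stk v) sc).2.2
              = PySem.Set.discard (PySem.Set.add stk v) v ∧
          (∀ x ∈ sc, x ∈ (dfsLoopA g fuel v rest (PySem.Set.add stk v) sc).2.1) ∧
          InvA edges (dfsLoopA g fuel v rest (PySem.Set.add stk v) sc).2.1 (PySem.Set.add stk v) ∧
          (∀ w, Edge edges v w →
            w ∈ (dfsLoopA g fuel v rest (PySem.Set.add stk v) sc).2.1 ∧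
              w ∉ PySem.Set.add stk v)) := by
      intro rest
      induction rest with
      | nil =>
        intro _ sc hsucc hIc _ _
        have heq0 : dfsLoopA g fuel v [] (PySem.Set.add stk v) sc
            = (false, sc, PySem.Set.discard (PySem.Set.add stk v) v) := by
          simp [dfsLoopA]
        rw [heq0]
        constructor
        · intro h; simp at h
        · intro _
          refine ⟨rfl, fun x hx => hx, hIc, ?_⟩
          intro w hw
          rcases hsucc w hw with h | h
          · simp at h
          · exact h
      | cons nxt rest ihr =>
        intro hrest sc hsucc hIc hremc hvsc
        have hEnxt : Edge edges v nxt := hrest nxt List.mem_cons_self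
        have hrest' : ∀ m ∈ rest, Edge edges v m := fun m hm => hrest m (List.mem_cons_of_mem _ hm)
        by_cases hcn : PySem.Set.contains (PySem.Set.add stk v) nxt = true
        · have hnstk1 : nxt ∈ PySem.Set.add stk v := (PySem.Set.contains_iff _ _).mp hcn
          have heq : dfsLoopA g fuel v (nxt :: rest) (PySem.Set.add stk v) sc = (true, sc, PySem.Set.add stk v) := by
            simp only [dfsLoopA]
            rw [hcn, if_pos rfl]
          rw [heq]
          constructor
          · intro _; exact ⟨v, nxt, hEnxt, hstk1 nxt hnstk1⟩
          · intro hfalse; simp at hfalse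
        · have hcn' : PySem.Set.contains (PySem.Set.add stk v) nxt = false := by
            cases h : PySem.Set.contains (PySem.Set.add stk v) nxt
            · rfl
            · exact absurd h hcn
          have hnstk1 : nxt ∉ PySem.Set.add stk v := (not_contains _ _).mp hcn'
          by_cases hcs : PySem.Set.contains sc nxt = true
          · have heq : dfsLoopA g fuel v (nxt :: rest) (PySem.Set.add stk v) sc
                = dfsLoopA g fuel v rest (PySem.Set.add stk v) sc := by
              simp only [dfsLoopA]
              rw [hcn', if_neg (by simp), hcs, if_pos rfl]
            rw [heq]
            refine ihr hrest' sc ?_ hIc hremc hvsc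
            intro w hw
            rcases hsucc w hw with h | h
            · rcases List.mem_cons.mp h with h' | h'
              · rw [h']
                exact Or.inr ⟨(PySem.Set.contains_iff _ _).mp hcs, hnstk1⟩
              · exact Or.inl h'
            · exact Or.inr h
          · have hcs' : PySem.Set.contains sc nxt = false := by
              cases h : PySem.Set.contains sc nxt
              · rfl
              · exact absurd h hcs
            have hnsc : nxt ∉ sc := (not_contains _ _).mp hcs'
            have hnN : nxt ∈ aNodes edges := (edge_mem_aNodes hEnxt).2
            have hstknxt : ∀ u ∈ PySem.Set.add stk v, Reach edges u nxt :=
              fun u hu => Relation.ReflTransGen.tail (hstk1 u hu) hEnxt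
            have hrec := ih nxt (PySem.Set.add stk v) sc hremc hnN hnsc hstknxt hIc
            cases hr1 : (dfsA g fuel nxt (PySem.Set.add stk v) sc).1
            · obtain ⟨hstkEq, hmono', hnxtmem, hI'⟩ := hrec.2 hr1
              have heq : dfsLoopA g fuel v (nxt :: rest) (PySem.Set.add stk v) sc
                  = dfsLoopA g fuel v rest (dfsA g fuel nxt (PySem.Set.add stk v) sc).2.2
                      (dfsA g fuel nxt (PySem.Set.add stk v) sc).2.1 := by
                simp only [dfsLoopA]
                rw [hcn', if_neg (by simp), hcs', if_neg (by simp), hr1, if_neg (by simp)]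
              rw [heq, hstkEq]
              have hihr := ihr hrest' (dfsA g fuel nxt (PySem.Set.add stk v) sc).2.1 ?_ hI'
                  (lt_of_le_of_lt (rem_le edges hmono') hremc) (hmono' v hvsc)
              · refine ⟨hihr.1, ?_⟩
                intro hfalse
                obtain ⟨ha, hb, hc, hd⟩ := hihr.2 hfalse
                exact ⟨ha, fun x hx => hb x (hmono' x hx), hc, hd⟩
              · intro w hw
                rcases hsucc w hw with h | h
                · rcases List.mem_cons.mp h with h' | h'
                  · rw [h']
                    exact Or.inr ⟨hnxtmem, hnstk1⟩
                  · exact Or.inl h'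
                · exact Or.inr ⟨hmono' w h.1, h.2⟩
            · have hcyc := hrec.1 hr1
              have heq : dfsLoopA g fuel v (nxt :: rest) (PySem.Set.add stk v) sc
                  = dfsA g fuel nxt (PySem.Set.add stk v) sc := by
                simp only [dfsLoopA]
                rw [hcn', if_neg (by simp), hcs', if_neg (by simp), hr1, if_pos rfl]
              rw [heq]
              constructor
              · intro _; exact hcyc
              · intro hfalse
                rw [hr1] at hfalse
                simp at hfalse
    have hmain := hloop (PySem.Dict.getD g v PySem.Set.empty)
        (fun nxt h => (hg v nxt).mp h) (PySem.Set.add seen v)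
        (fun w hw => Or.inl ((hg v w).mpr hw)) hI1 hrem1 hvs1
    have heqA : dfsA g (fuel + 1) v stk seen
        = dfsLoopA g fuel v (PySem.Dict.getD g v PySem.Set.empty)
            (PySem.Set.add stk v) (PySem.Set.add seen v) := by
      simp [dfsA]
    rw [heqA]
    constructor
    · exact hmain.1
    · intro hfalse
      obtain ⟨hstkEq, hmono, hI', hsucc⟩ := hmain.2 hfalse
      rw [hstkEq]
      refine ⟨discard_add stk v hvstk, ?_, ?_, ?_⟩
      · exact fun x hx => hmono x (hseen_sub x hx)
      · exact hmono v hvs1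
      · exact inv_pop hI' hvstk (hmono v hvs1) hsucc

lemma outer_main (g : PySem.Dict String (PySem.Set String)) (edges : List (String × String))
    (hg : ∀ v w, w ∈ PySem.Dict.getD g v PySem.Set.empty ↔ Edge edges v w) (fuel : Nat) :
    ∀ (ks : List String) (seen : PySem.Set String),
      (∀ n ∈ ks, n ∈ aNodes edges) → InvA edges seen PySem.Set.empty → rem edges seen < fuel →
      (outerA g fuel ks seen = true → HasCyc edges) ∧
      (outerA g fuel ks seen = false →
        ∃ s', InvA edges s' PySem.Set.empty ∧ (∀ x ∈ seen, x ∈ s') ∧ (∀ n ∈ ks, n ∈ s')) := by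
  intro ks
  induction ks with
  | nil =>
    intro seen _ hI _
    constructor
    · intro h; simp [outerA] at h
    · intro _
      exact ⟨seen, hI, fun x hx => hx, by intro n hn; simp at hn⟩
  | cons n rest ihk =>
    intro seen hks hI hrem
    have hks' : ∀ m ∈ rest, m ∈ aNodes edges := fun m hm => hks m (List.mem_cons_of_mem _ hm)
    by_cases hc : PySem.Set.contains seen n = true
    · have heq : outerA g fuel (n :: rest) seen = outerA g fuel rest seen := by
        simp only [outerA]
        rw [hc, if_pos rfl]
      rw [heq]
      obtain ⟨t1, t2⟩ := ihk seen hks' hI hrem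
      refine ⟨t1, ?_⟩
      intro h
      obtain ⟨s', hI', hmono, hkss⟩ := t2 h
      refine ⟨s', hI', hmono, ?_⟩
      intro m hm
      rcases List.mem_cons.mp hm with h' | h'
      · rw [h']
        exact hmono n ((PySem.Set.contains_iff _ _).mp hc)
      · exact hkss m h'
    · have hc' : PySem.Set.contains seen n = false := by
        cases h : PySem.Set.contains seen n
        · rfl
        · exact absurd h hc
      have hn : n ∉ seen := (not_contains _ _).mp hc'
      have hstk0 : ∀ u ∈ (PySem.Set.empty : PySem.Set String), Reach edges u n := by
        intro u hu; simp [PySem.Set.empty] at hu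
      have hd := dfs_main g edges hg fuel n PySem.Set.empty seen hrem
        (hks n List.mem_cons_self) hn hstk0 hI
      cases hr1 : (dfsA g fuel n PySem.Set.empty seen).1
      · obtain ⟨_, hmono, hnmem, hI'⟩ := hd.2 hr1
        have heq : outerA g fuel (n :: rest) seen
            = outerA g fuel rest (dfsA g fuel n PySem.Set.empty seen).2.1 := by
          simp only [outerA]
          rw [hc', if_neg (by simp), hr1, if_neg (by simp)]
        rw [heq]
        have hrem' : rem edges (dfsA g fuel n PySem.Set.empty seen).2.1 < fuel :=
          lt_of_le_of_lt (rem_le edges hmono) hrem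
        obtain ⟨t1, t2⟩ := ihk (dfsA g fuel n PySem.Set.empty seen).2.1 hks' hI' hrem'
        refine ⟨t1, ?_⟩
        intro h
        obtain ⟨s', hI'', hmono', hkss⟩ := t2 h
        refine ⟨s', hI'', fun x hx => hmono' x (hmono x hx), ?_⟩
        intro m hm
        rcases List.mem_cons.mp hm with h' | h'
        · rw [h']
          exact hmono' n hnmem
        · exact hkss m h'
      · have heq : outerA g fuel (n :: rest) seen = true := by
          simp only [outerA]
          rw [hc', if_neg (by simp), hr1, if_pos rfl]
        rw [heq]
        exact ⟨fun _ => hd.1 hr1, fun h => by simp at h⟩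

lemma cycA_iff (F : List (List String × String)) :
    (outerA (buildG F) (nodeBound F) (buildG F).keys PySem.Set.empty = true) ↔ HasCyc (edgesB F) := by
  have hg : ∀ v w, w ∈ PySem.Dict.getD (buildG F) v PySem.Set.empty ↔ Edge (edgesB F) v w :=
    mem_getD_buildG F
  have hkeys : ∀ n ∈ (buildG F).keys, n ∈ aNodes (edgesB F) := by
    intro n hn
    exact List.mem_append.mpr (Or.inl ((mem_keys_buildG F n).mp hn))
  have hI0 : InvA (edgesB F) PySem.Set.empty PySem.Set.empty := by
    refine ⟨?_, ?_, ?_⟩ <;> intro u hu <;> simp [PySem.Set.empty] at hu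
  have hrem0 : rem (edgesB F) PySem.Set.empty < nodeBound F :=
    lt_of_le_of_lt (rem_le_two_mul _ _) (two_mul_edges_lt_nodeBound F)
  obtain ⟨t1, t2⟩ := outer_main (buildG F) (edgesB F) hg (nodeBound F)
    (buildG F).keys PySem.Set.empty hkeys hI0 hrem0
  constructor
  · exact t1
  · intro hcyc
    by_contra hne
    have hfalse : outerA (buildG F) (nodeBound F) (buildG F).keys PySem.Set.empty = false := by
      cases h : outerA (buildG F) (nodeBound F) (buildG F).keys PySem.Set.empty
      · rfl
      · exact absurd h hne
    obtain ⟨s', hI', _, hkss⟩ := t2 hfalse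
    obtain ⟨v, w, hE, hR⟩ := hcyc
    have hv : v ∈ s' := hkss v ((mem_keys_buildG F v).mpr (List.mem_map.mpr ⟨(v, w), hE, rfl⟩))
    exact hI'.2.2 v hv (by simp [PySem.Set.empty]) w hE hR

-- ---- B side ----
lemma mem_stepLive (edges : List (String × String)) (live : PySem.Set String) (x : String) :
    x ∈ stepLive edges live ↔ ∃ w, w ∈ live ∧ Edge edges w x := by
  unfold stepLive
  rw [PySem.Set.mem_ofList]
  constructor
  · intro h
    obtain ⟨e, he, hex⟩ := List.mem_map.mp h
    obtain ⟨hmem, hcont⟩ := List.mem_filter.mp he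
    refine ⟨e.1, (PySem.Set.contains_iff _ _).mp hcont, ?_⟩
    unfold Edge
    rw [show (e.1, x) = e from by rw [← hex]]
    exact hmem
  · rintro ⟨w, hw, hE⟩
    refine List.mem_map.mpr ⟨(w, x), List.mem_filter.mpr ⟨hE, ?_⟩, rfl⟩
    exact (PySem.Set.contains_iff _ _).mpr hw

lemma chain_snoc {edges : List (String × String)} {p : List String} {w x : String}
    (hc : List.IsChain (Edge edges) p) (hlast : p.getLast? = some w) (hE : Edge edges w x) :
    List.IsChain (Edge edges) (p ++ [x]) := by
  refine List.isChain_append.mpr ⟨hc, List.isChain_singleton x, ?_⟩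
  intro y hy z hz
  simp only [List.head?_cons, Option.mem_def, Option.some.injEq] at hz
  rw [hlast] at hy
  simp only [Option.mem_def, Option.some.injEq] at hy
  rw [← hy, ← hz]
  exact hE

lemma cyc_mem_iterLive (edges : List (String × String))
    {a b : String} (hE : Edge edges a b) (hR : Reach edges b a) :
    ∀ (k : Nat) (live : PySem.Set String),
      (∀ x, Reach edges b x → Reach edges x a → x ∈ live) →
      ∀ x, Reach edges b x → Reach edges x a → x ∈ iterLive edges k live := by
  intro k
  induction k with
  | zero =>
    intro live hC x hbx hxa
    exact hC x hbx hxa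
  | succ k ih =>
    intro live hC x hbx hxa
    simp only [iterLive]
    by_cases heqq : PySem.Set.equal (stepLive edges live) live = true
    · rw [if_pos heqq]
      exact hC x hbx hxa
    · rw [if_neg heqq]
      refine ih (stepLive edges live) ?_ x hbx hxa
      intro y hby hya
      rcases Relation.ReflTransGen.cases_tail hby with hyb | ⟨c, hbc, hcy⟩
      · subst hyb
        exact (mem_stepLive _ _ _).mpr ⟨a, hC a hR Relation.ReflTransGen.refl, hE⟩
      · exact (mem_stepLive _ _ _).mpr
          ⟨c, hC c hbc (Relation.ReflTransGen.head hcy hya), hcy⟩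

lemma fix_path {edges : List (String × String)} {S : PySem.Set String}
    (hfix : ∀ x ∈ S, x ∈ stepLive edges S) :
    ∀ (m : Nat) (x : String), x ∈ S →
      ∃ p, List.IsChain (Edge edges) p ∧ p.getLast? = some x ∧ p.length = m + 1 := by
  intro m
  induction m with
  | zero =>
    intro x _
    exact ⟨[x], List.isChain_singleton x, rfl, rfl⟩
  | succ m ih =>
    intro x hx
    obtain ⟨w, hw, hEwx⟩ := (mem_stepLive _ _ _).mp (hfix x hx)
    obtain ⟨p, hc, hlast, hlen⟩ := ih w hw
    exact ⟨p ++ [x], chain_snoc hc hlast hEwx, List.getLast?_concat, by simp [hlen]⟩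

lemma chain_reach_of_mem {edges : List (String × String)} :
    ∀ (t : List String) (b x : String), List.IsChain (Edge edges) (b :: t) → x ∈ b :: t →
      Reach edges b x := by
  intro t
  induction t with
  | nil =>
    intro b x _ hx
    rw [List.mem_singleton] at hx
    rw [hx]
    exact Relation.ReflTransGen.refl
  | cons c t' iht =>
    intro b x hch hx
    rcases List.mem_cons.mp hx with rfl | hx'
    · exact Relation.ReflTransGen.refl
    · have h := List.isChain_cons_cons.mp hch
      exact Relation.ReflTransGen.head h.1 (iht c x h.2 hx')

lemma dup_cycle {edges : List (String × String)} :
    ∀ (p : List String) (u : String), List.IsChain (Edge edges) p → [u, u].Sublist p →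
      HasCyc edges := by
  intro p
  induction p with
  | nil =>
    intro u _ hsub
    simp at hsub
  | cons a t ihp =>
    intro u hch hsub
    cases hsub with
    | cons _ h => exact ihp u hch.tail h
    | cons₂ _ h =>
      have hut : a ∈ t := List.singleton_sublist.mp h
      cases t with
      | nil => simp at hut
      | cons c t' =>
        have hcc := List.isChain_cons_cons.mp hch
        exact ⟨a, c, hcc.1, chain_reach_of_mem t' c a hcc.2 hut⟩

lemma chain_pairs_mem {edges : List (String × String)} {p : List String}
    (h : List.IsChain (Edge edges) p) :
    ∀ e ∈ p.dropLast.zip p.tail, Edge edges e.1 e.2 := by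
  intro e he
  rw [List.mem_iff_getElem] at he
  obtain ⟨i, hi, hei⟩ := he
  have hi' : i < p.length - 1 := by
    simp only [List.length_zip, List.length_dropLast, List.length_tail, min_self] at hi
    exact hi
  have h2 : i + 1 < p.length := by omega
  have hR := List.isChain_iff_getElem.mp h i h2
  have hd : i < p.dropLast.length := by simp [List.length_dropLast]; omega
  have ht : i < p.tail.length := by simp [List.length_tail]; omega
  rw [← hei]
  simp only [List.getElem_zip, List.getElem_dropLast, List.getElem_tail]
  exact hR

lemma chain_long_cycle {edges : List (String × String)} {p : List String}
    (h : List.IsChain (Edge edges) p) (hl : edges.length + 2 ≤ p.length) :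
    HasCyc edges := by
  by_cases hnd : p.Nodup
  · exfalso
    have hfst : List.map Prod.fst (p.dropLast.zip p.tail) = p.dropLast :=
      List.map_fst_zip (by simp [List.length_dropLast, List.length_tail])
    have hdl : p.dropLast.Nodup := List.Nodup.sublist (List.dropLast_sublist p) hnd
    have hpairs_nd : (p.dropLast.zip p.tail).Nodup := by
      refine List.Nodup.of_map Prod.fst ?_
      rw [hfst]; exact hdl
    have hsub : ∀ e ∈ p.dropLast.zip p.tail, e ∈ edges := fun e he => chain_pairs_mem h e he
    have hlenp : (p.dropLast.zip p.tail).length = p.length - 1 := by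
      simp [List.length_zip, List.length_dropLast, List.length_tail]
    have hcard : (p.dropLast.zip p.tail).toFinset.card ≤ edges.toFinset.card :=
      Finset.card_le_card (fun e he => List.mem_toFinset.mpr (hsub e (List.mem_toFinset.mp he)))
    rw [List.toFinset_card_of_nodup hpairs_nd, hlenp] at hcard
    have hle := List.toFinset_card_le edges
    omega
  · have hdup : ∃ u, [u, u].Sublist p := by
      rw [List.nodup_iff_sublist] at hnd
      exact not_forall_not.mp hnd
    obtain ⟨u, hsub⟩ := hdup
    exact dup_cycle p u h hsub

lemma iter2_path (edges : List (String × String)) :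
    ∀ (k n : Nat) (live : PySem.Set String),
      (∀ y ∈ live, ∃ p, List.IsChain (Edge edges) p ∧ p.getLast? = some y ∧ n + 1 ≤ p.length) →
      ∀ x ∈ iterLive edges k live,
        (∃ p, List.IsChain (Edge edges) p ∧ p.getLast? = some x ∧ n + k + 1 ≤ p.length) ∨
          HasCyc edges := by
  intro k
  induction k with
  | zero =>
    intro n live hbase x hx
    obtain ⟨p, hc, hl, hlen⟩ := hbase x hx
    exact Or.inl ⟨p, hc, hl, by omega⟩
  | succ k ih =>
    intro n live hbase x hx
    simp only [iterLive] at hx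
    by_cases heqq : PySem.Set.equal (stepLive edges live) live = true
    · rw [if_pos heqq] at hx
      right
      have hfix : ∀ y ∈ live, y ∈ stepLive edges live :=
        fun y hy => ((PySem.Set.equal_iff _ _).mp heqq y).mpr hy
      obtain ⟨p, hc, _, hlen⟩ := fix_path hfix (edges.length + 1) x hx
      exact chain_long_cycle hc (by omega)
    · rw [if_neg heqq] at hx
      have hbase' : ∀ y ∈ stepLive edges live,
          ∃ p, List.IsChain (Edge edges) p ∧ p.getLast? = some y ∧ (n + 1) + 1 ≤ p.length := by
        intro y hy
        obtain ⟨w, hw, hEwy⟩ := (mem_stepLive _ _ _).mp hy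
        obtain ⟨p, hc, hlast, hlen⟩ := hbase w hw
        refine ⟨p ++ [y], chain_snoc hc hlast hEwy, List.getLast?_concat, ?_⟩
        simp only [List.length_append, List.length_cons, List.length_nil]
        omega
      rcases ih (n + 1) (stepLive edges live) hbase' x hx with ⟨p, hc, hl, hlen⟩ | hcyc
      · exact Or.inl ⟨p, hc, hl, by omega⟩
      · exact Or.inr hcyc

lemma cycB_iff (F : List (List String × String)) :
    ((!(iterLive (edgesB F) ((edgesB F).length + 1)
        (PySem.Set.union (PySem.Set.ofList ((edgesB F).map Prod.fst)) ((edgesB F).map Prod.snd))).isEmpty) = true)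
      ↔ HasCyc (edgesB F) := by
  constructor
  · intro h
    have hne : (iterLive (edgesB F) ((edgesB F).length + 1)
        (PySem.Set.union (PySem.Set.ofList ((edgesB F).map Prod.fst))
          ((edgesB F).map Prod.snd))) ≠ [] := by
      intro hnil
      rw [hnil] at h
      simp at h
    obtain ⟨x, hx⟩ := List.exists_mem_of_ne_nil _ hne
    have hbase : ∀ y ∈ (PySem.Set.union (PySem.Set.ofList ((edgesB F).map Prod.fst))
        ((edgesB F).map Prod.snd)),
        ∃ p, List.IsChain (Edge (edgesB F)) p ∧ p.getLast? = some y ∧ 0 + 1 ≤ p.length :=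
      fun y _ => ⟨[y], List.isChain_singleton y, rfl, by simp⟩
    rcases iter2_path (edgesB F) ((edgesB F).length + 1) 0 _ hbase x hx with ⟨p, hc, _, hlen⟩ | hcyc
    · exact chain_long_cycle hc (by omega)
    · exact hcyc
  · intro hcyc
    obtain ⟨a, b, hE, hR⟩ := hcyc
    have hC0 : ∀ x, Reach (edgesB F) b x → Reach (edgesB F) x a →
        x ∈ PySem.Set.union (PySem.Set.ofList ((edgesB F).map Prod.fst)) ((edgesB F).map Prod.snd) := by
      intro x hbx _
      rcases Relation.ReflTransGen.cases_tail hbx with hxb | ⟨c, _, hcx⟩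
      · subst hxb
        exact (PySem.Set.mem_union _ _ _).mpr (Or.inr (List.mem_map.mpr ⟨(a, _), hE, rfl⟩))
      · exact (PySem.Set.mem_union _ _ _).mpr (Or.inr (List.mem_map.mpr ⟨(c, x), hcx, rfl⟩))
    have hb := cyc_mem_iterLive (edgesB F) hE hR ((edgesB F).length + 1) _ hC0 b
      Relation.ReflTransGen.refl hR
    have hne := List.ne_nil_of_mem hb
    cases hl : (iterLive (edgesB F) ((edgesB F).length + 1)
        (PySem.Set.union (PySem.Set.ofList ((edgesB F).map Prod.fst))
          ((edgesB F).map Prod.snd))) with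
    | nil => exact absurd hl hne
    | cons y ys => rfl

-- ===== VERDICT (by name: the statement is the Claim_ definition above) =====
theorem is_redundancy_py_spec : Claim_equal_is_redundancy_py := by
  intro F _
  unfold Spec_is_redundancy_py is_redundancy_py is_redundancy_py_alt
  have hdup : dupLoopA F PySem.Set.empty = false ↔ (F.map Prod.snd).Nodup := by
    rw [dupLoopA_false_iff]
    simp [PySem.Set.empty]
  cases hD : dupLoopA F PySem.Set.empty
  · have hnd := hdup.mp hD
    have hlen : (PySem.Set.ofList (F.map Prod.snd)).length = (F.map Prod.snd).length :=
      (ofList_length_eq_iff _).mpr hnd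
    have hcond : ¬ ((PySem.Set.ofList (F.map Prod.snd)).length ≠ (F.map Prod.snd).length) := by
      rw [hlen]
      exact fun h => h rfl
    simp only [Bool.false_eq_true, if_false, if_neg hcond]
    rw [Bool.eq_iff_iff, cycA_iff]
    exact (cycB_iff F).symm
  · have hnnd : ¬ (F.map Prod.snd).Nodup := by
      intro h
      have hcontra := hdup.mpr h
      rw [hD] at hcontra
      simp at hcontra
    have hne : (PySem.Set.ofList (F.map Prod.snd)).length ≠ (F.map Prod.snd).length :=
      fun h => hnnd ((ofList_length_eq_iff _).mp h)
    simp only [if_true, if_pos hne]
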